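-- pv_equiv track=rewrite | github.com/aiguy110/advent-of-code-2020 | day_10/solution2.py | is_valid_config
-- ===== SOURCE A (Python) =====
-- def is_valid_config(adapters, end_adapter, start_adapter=0):
--     if len(adapters) == 0:
--         if end_adapter - start_adapter > 3:
--             return False
--         else:
--             return True
--     if adapters[0] - start_adapter > 3:
--         return False
--     if end_adapter - adapters[-1] > 3:
--         return False
--
--     for i in range(1, len(adapters)):
--         if adapters[i] - adapters[i-1] > 3:
--             return False
--
--     return True
-- ===== SOURCE B (Python) =====
-- def is_valid_config(adapters, end_adapter, start_adapter=0):
--     # Divide and conquer: a chain lo .. seg .. hi has no gap over 3 iff each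
--     # half (split at the middle element) has none and the junctions are fine.
--     def ok(lo, seg, hi):
--         if not seg:
--             return hi - lo <= 3
--         m = len(seg) // 2
--         return ok(lo, seg[:m], seg[m]) and ok(seg[m], seg[m+1:], hi)
--     return ok(start_adapter, list(adapters), end_adapter)
-- ===== Notes on version B (the rewrite author's own statement) =====
-- stated objective: alternative
-- what changed: B validates the chain by divide and conquer: it recursively splits the adapter list at its middle element, checking each half between its bounding values, with the empty segment as the single gap check; A instead runs a linear indexed loop with separate special cases for the start gap, the end gap and the empty list.
import Mathlib
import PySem

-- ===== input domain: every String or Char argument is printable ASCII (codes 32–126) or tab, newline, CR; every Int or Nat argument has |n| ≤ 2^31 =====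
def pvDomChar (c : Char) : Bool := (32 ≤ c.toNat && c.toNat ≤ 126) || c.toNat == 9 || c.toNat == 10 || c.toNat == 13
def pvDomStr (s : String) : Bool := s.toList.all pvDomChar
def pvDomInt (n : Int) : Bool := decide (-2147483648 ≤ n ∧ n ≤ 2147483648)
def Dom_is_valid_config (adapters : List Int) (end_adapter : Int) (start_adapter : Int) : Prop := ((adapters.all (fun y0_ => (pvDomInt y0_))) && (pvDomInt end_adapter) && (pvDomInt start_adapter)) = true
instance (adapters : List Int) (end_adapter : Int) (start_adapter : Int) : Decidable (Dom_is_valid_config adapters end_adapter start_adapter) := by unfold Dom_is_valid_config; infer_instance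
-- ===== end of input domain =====

-- B validates the chain by divide and conquer on the adapter list (split at the
-- middle element) instead of A's linear indexed loop with boundary special cases
-- (objective: alternative).


-- ===== PORT A =====
-- A's 'for i in range(1, len(adapters))' loop: return False at the first gap over 3.
def isValidLoopA (adapters : List Int) : List Int → Bool
  | [] => true
  | i :: rest =>
    if (PySem.List.pyGet? adapters i).getD 0 - (PySem.List.pyGet? adapters (i - 1)).getD 0 > 3 then false
    else isValidLoopA adapters rest

def is_valid_config (adapters : List Int) (end_adapter : Int) (start_adapter : Int) : Bool :=
  if adapters.length = 0 then
    if end_adapter - start_adapter > 3 then false else true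
  else
    if (PySem.List.pyGet? adapters 0).getD 0 - start_adapter > 3 then false
    else if end_adapter - (PySem.List.pyGet? adapters (-1)).getD 0 > 3 then false
    else isValidLoopA adapters (PySem.List.pyRange 1 adapters.length 1)

-- ===== PORT B =====
-- B's helper ok(lo, seg, hi): divide and conquer at the middle element.
-- seg[m] with m = len(seg)//2 < len(seg) is always in range, so getD is exact;
-- seg[:m] / seg[m+1:] are List.take / List.drop (exact for these in-range bounds).
def okB (lo : Int) (seg : List Int) (hi : Int) : Bool :=
  if _hseg : seg = [] then decide (hi - lo ≤ 3)
  else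
    let m := seg.length / 2
    okB lo (seg.take m) (seg.getD m 0) && okB (seg.getD m 0) (seg.drop (m + 1)) hi
termination_by seg.length
decreasing_by
  · simp only [List.length_take]
    have : seg.length ≠ 0 := fun h => _hseg (List.eq_nil_of_length_eq_zero h)
    omega
  · simp only [List.length_drop]
    have : seg.length ≠ 0 := fun h => _hseg (List.eq_nil_of_length_eq_zero h)
    omega

def is_valid_config_alt (adapters : List Int) (end_adapter : Int) (start_adapter : Int) : Bool :=
  okB start_adapter adapters end_adapter

-- ===== PRECONDITION & SPEC =====
def Spec_is_valid_config (adapters : List Int) (end_adapter : Int) (start_adapter : Int) (out : Bool) : Prop := out = is_valid_config_alt adapters end_adapter start_adapter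
instance (adapters : List Int) (end_adapter : Int) (start_adapter : Int) (out : Bool) : Decidable (Spec_is_valid_config adapters end_adapter start_adapter out) := by unfold Spec_is_valid_config; infer_instance

-- ===== CLAIM (what is proved, stated in full; the proofs are below) =====
def Claim_equal_is_valid_config : Prop := ∀ (adapters : List Int) (end_adapter : Int) (start_adapter : Int), Dom_is_valid_config adapters end_adapter start_adapter → Spec_is_valid_config adapters end_adapter start_adapter (is_valid_config adapters end_adapter start_adapter)

-- ===== LEMMAS AND PROOFS =====

-- Proof-side bridge: the adjacent-pair check over the chain [s] ++ adapters ++ [e].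
def pairsOk (xs : List Int) : Bool := (xs.zip xs.tail).all (fun p => p.2 - p.1 ≤ 3)

lemma pairsOk_cons_cons (a b : Int) (rest : List Int) :
    pairsOk (a :: b :: rest) = ((decide (b - a ≤ 3)) && pairsOk (b :: rest)) := by
  simp [pairsOk]

-- splitting a chain at a shared middle element
lemma pairsOk_split (xs : List Int) (m : Int) (ys : List Int) :
    pairsOk (xs ++ m :: ys) = (pairsOk (xs ++ [m]) && pairsOk (m :: ys)) := by
  induction xs with
  | nil => simp [pairsOk]
  | cons a xs' ih =>
    cases xs' with
    | nil => simp [pairsOk]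
    | cons b xs'' =>
      simp only [List.cons_append] at ih ⊢
      rw [pairsOk_cons_cons, pairsOk_cons_cons, ih, Bool.and_assoc]

lemma chain_split (lo g hi : Int) (t d : List Int) :
    pairsOk (lo :: (t ++ g :: (d ++ [hi]))) = (pairsOk (lo :: (t ++ [g])) && pairsOk (g :: (d ++ [hi]))) := by
  have h := pairsOk_split (lo :: t) g (d ++ [hi])
  simpa using h

lemma okB_eq_pairsOk (n : Nat) : ∀ (seg : List Int), seg.length = n →
    ∀ (lo hi : Int), okB lo seg hi = pairsOk (lo :: seg ++ [hi]) := by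
  induction n using Nat.strong_induction_on with
  | _ n ih =>
    intro seg hlen lo hi
    by_cases hseg : seg = []
    · subst hseg; simp [okB, pairsOk]
    · rw [okB, dif_neg hseg]
      simp only []
      have hpos : 0 < seg.length := List.length_pos_iff.mpr hseg
      set m := seg.length / 2 with hm
      have hmlt : m < seg.length := by omega
      have hget : seg.getD m 0 = seg[m]'hmlt := List.getD_eq_getElem seg 0 hmlt
      have hdecomp : seg = seg.take m ++ seg[m]'hmlt :: seg.drop (m + 1) := by
        conv_lhs => rw [← List.take_append_drop m seg]
        rw [List.drop_eq_getElem_cons hmlt]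
      have h1 : okB lo (seg.take m) (seg.getD m 0)
          = pairsOk (lo :: seg.take m ++ [seg[m]'hmlt]) := by
        rw [hget]
        exact ih (seg.take m).length (by subst hlen; simp [List.length_take]; omega)
          _ rfl lo _
      have h2 : okB (seg.getD m 0) (seg.drop (m + 1)) hi
          = pairsOk (seg[m]'hmlt :: seg.drop (m + 1) ++ [hi]) := by
        rw [hget]
        exact ih (seg.drop (m + 1)).length
          (by subst hlen; simp [List.length_drop]; omega) _ rfl _ hi
      show (okB lo (seg.take m) (seg.getD m 0)
            && okB (seg.getD m 0) (seg.drop (m + 1)) hi)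
          = pairsOk (lo :: seg ++ [hi])
      rw [h1, h2]
      simp only [List.cons_append] at *
      rw [← chain_split lo (seg[m]'hmlt) hi (seg.take m) (seg.drop (m + 1))]
      congr 1
      simp only [← List.append_assoc, ← List.cons_append]
      congr 1
      rw [List.cons_append, ← hdecomp]

lemma alt_eq_pairsOk (adapters : List Int) (e s : Int) :
    is_valid_config_alt adapters e s = pairsOk (s :: (adapters ++ [e])) :=
  okB_eq_pairsOk adapters.length adapters rfl s e

-- shift: the loop on (x :: t) at indices i+1 (i ≥ 1) equals the loop on t at indices i
lemma loopA_shift (t : List Int) (x : Int) (idxs : List Int) (h : ∀ i ∈ idxs, 1 ≤ i) :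
    isValidLoopA (x :: t) (idxs.map (· + 1)) = isValidLoopA t idxs := by
  induction idxs with
  | nil => rfl
  | cons i rest ih =>
    have hi : 1 ≤ i := h i (by simp)
    have h1 : PySem.List.pyGet? (x :: t) (i + 1) = PySem.List.pyGet? t i := by
      obtain ⟨n, hn⟩ := Int.eq_ofNat_of_zero_le (by omega : (0:Int) ≤ i)
      rw [hn, PySem.List.pyGet?_cons_succ]
    have h2 : PySem.List.pyGet? (x :: t) (i + 1 - 1) = PySem.List.pyGet? t (i - 1) := by
      have he : i + 1 - 1 = (i - 1) + 1 := by omega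
      obtain ⟨n, hn⟩ := Int.eq_ofNat_of_zero_le (by omega : (0:Int) ≤ i - 1)
      rw [he, hn, PySem.List.pyGet?_cons_succ]
    simp only [List.map_cons, isValidLoopA, h1, h2]
    split
    · rfl
    · exact ih (fun j hj => h j (by simp [hj]))

-- the index range 2..n shifted down: pyRange 2 n 1 = (pyRange 1 (n-1) 1).map (·+1)
lemma pyRange_two_shift (n : Int) :
    PySem.List.pyRange 2 n 1 = (PySem.List.pyRange 1 (n - 1) 1).map (· + 1) := by
  rw [PySem.List.pyRange_one, PySem.List.pyRange_one, List.map_map]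
  have : (n - 2).toNat = (n - 1 - 1).toNat := by omega
  rw [this]
  apply List.map_congr_left
  intro k _
  simp [Function.comp]
  omega

-- key lemma: A's end-gap check plus inner loop on a nonempty list = the pair pass over (list ++ [e])
lemma key (t : List Int) (x e : Int) :
    (if e - ((x :: t).getLast?.getD 0) > 3 then false
     else isValidLoopA (x :: t) (PySem.List.pyRange 1 ((x :: t).length) 1))
    = pairsOk ((x :: t) ++ [e]) := by
  induction t generalizing x with
  | nil =>
    rw [PySem.List.pyRange_one_eq_nil (by simp)]
    simp only [isValidLoopA, List.getLast?, Option.getD, pairsOk]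
    simp only [List.cons_append, List.nil_append]
    by_cases hc : e - x > 3 <;> simp [hc] <;> omega
  | cons y r ih =>
    have hlen : ((x :: y :: r).length : Int) = (r.length : Int) + 2 := by
      simp; ring
    rw [hlen, PySem.List.pyRange_one_cons (by omega)]
    have hr2 : (1:Int) + 1 = 2 := by norm_num
    rw [hr2, pyRange_two_shift]
    have hsh : isValidLoopA (x :: y :: r) ((PySem.List.pyRange 1 ((r.length:Int) + 2 - 1) 1).map (· + 1))
        = isValidLoopA (y :: r) (PySem.List.pyRange 1 ((r.length:Int) + 2 - 1) 1) := by
      apply loopA_shift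
      intro i hi
      exact (PySem.List.mem_pyRange_one.mp hi).1
    have hlen2 : ((r.length : Int) + 2 - 1) = ((y :: r).length : Int) := by simp; ring
    have hlast : (x :: y :: r).getLast?.getD 0 = (y :: r).getLast?.getD 0 := by
      simp [List.getLast?_cons_cons]
    have hget1 : PySem.List.pyGet? (x :: y :: r) 1 = some y := by
      have h01 : (1:Int) = (0:Nat) + 1 := by norm_num
      rw [h01, PySem.List.pyGet?_cons_succ]
      norm_num [PySem.List.pyGet?_zero_cons]
    have hget0 : PySem.List.pyGet? (x :: y :: r) (1 - 1) = some x := by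
      norm_num [PySem.List.pyGet?_zero_cons]
    simp only [isValidLoopA, hget1, hget0, Option.getD_some, hsh]
    simp only [hlen2, hlast]
    rw [List.cons_append, List.cons_append, pairsOk_cons_cons, ← List.cons_append, ← ih y]
    by_cases hA : e - ((y :: r).getLast?.getD 0) > 3 <;>
      by_cases hB : y - x > 3 <;>
      simp [hA, hB] <;> omega

-- ===== VERDICT (by name: the statement is the Claim_ definition above) =====
theorem is_valid_config_spec : Claim_equal_is_valid_config := by
  intro adapters e s _
  unfold Spec_is_valid_config
  rw [alt_eq_pairsOk]
  cases adapters with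
  | nil =>
    simp only [is_valid_config, List.length_nil, pairsOk, List.nil_append]
    by_cases hc : e - s > 3 <;> simp [hc] <;> omega
  | cons x t =>
    have hlen : (x :: t).length ≠ 0 := by simp
    have hget0 : PySem.List.pyGet? (x :: t) 0 = some x := PySem.List.pyGet?_zero_cons x t
    have hgetm1 : PySem.List.pyGet? (x :: t) (-1) = (x :: t).getLast? :=
      PySem.List.pyGet?_neg_one _
    simp only [is_valid_config, if_neg hlen, hget0, hgetm1, Option.getD_some]
    rw [List.cons_append, pairsOk_cons_cons, ← List.cons_append, ← key t x e]
    by_cases hA : x - s > 3 <;>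
      by_cases hB : e - ((x :: t).getLast?.getD 0) > 3 <;>
      simp [hA, hB] <;> omega
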